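-- pv_equiv track=rewrite | github.com/julambl75/asg-summarisation | Code/preprocessor.py | _expand_complex_clauses
-- ===== SOURCE A (Python) =====
-- from operator import itemgetter
--
-- VERB_POS = 'VB'
--
-- COMPLEX_CLAUSE_AUX_VERB_POS = 'VBN'
--
-- COMPLEX_CLAUSE_SUBSTITUTIONS = {'a': 'The'}
--
-- EOS_TOKENIZED = ('.', '.')
--
-- def _expand_complex_clauses(tokenized):
--     i = 0
--     while i < len(tokenized):
--         sentence = tokenized[i]
--         pos_tags = list(map(itemgetter(1), sentence))
--         if COMPLEX_CLAUSE_AUX_VERB_POS in pos_tags: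
--             aux_clause_idx = pos_tags.index(COMPLEX_CLAUSE_AUX_VERB_POS)
--         else:
--             aux_clause_idx = -1
--
--         # If there is an auxiliary clause (starting with a VBN that does not follow a verb)
--         if aux_clause_idx > 0 and not pos_tags[aux_clause_idx-1].startswith(VERB_POS):
--             main_clause = sentence[:aux_clause_idx]
--             aux_clause_obj = sentence[aux_clause_idx:]
--
--             # Prepend to the auxiliary clause everything in the main clause after its last verb
--             #   i.e., use the main clause's object as the subject of the auxiliary clause
--             pos_tags_main = pos_tags[:aux_clause_idx]
--             main_clause_verbs = list(filter(lambda t: t[1].startswith(VERB_POS), main_clause))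
--             main_clause_obj_idx = len(main_clause) - pos_tags_main[::-1].index(main_clause_verbs[-1][1])
--             main_clause_obj = main_clause[main_clause_obj_idx:]
--
--             # Change 'a' to 'the' at start of subject of the auxiliary sentence
--             first_aux_word, first_aux_pos = main_clause_obj[0]
--             if first_aux_word in COMPLEX_CLAUSE_SUBSTITUTIONS.keys():
--                 first_aux_word = COMPLEX_CLAUSE_SUBSTITUTIONS[first_aux_word]
--                 main_clause_obj[0] = (first_aux_word, first_aux_pos)
--             aux_clause = main_clause_obj + main_clause_verbs + aux_clause_obj
--
--             # Replace tokenized sentence with two tokenized sentences and check auxiliary clause next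
--             tokenized[i] = main_clause + [EOS_TOKENIZED]
--             tokenized.insert(i+1, aux_clause)
--         i += 1
--     return tokenized
-- ===== SOURCE B (Python) =====
-- VERB_POS = 'VB'
--
-- COMPLEX_CLAUSE_AUX_VERB_POS = 'VBN'
--
-- COMPLEX_CLAUSE_SUBSTITUTIONS = {'a': 'The'}
--
-- EOS_TOKENIZED = ('.', '.')
--
--
-- def _find_aux_idx(sentence):
--     """First position tagged VBN, or None."""
--     for i, (_, pos) in enumerate(sentence):
--         if pos == COMPLEX_CLAUSE_AUX_VERB_POS:
--             return i
--     return None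
--
--
-- def _split_once(sentence):
--     """(main_clause + [EOS], aux_clause) if the sentence holds an auxiliary clause
--     (a VBN not preceded by a verb), else None.  One forward pass over the main
--     clause collects its verbs and the position of its last verb."""
--     idx = _find_aux_idx(sentence)
--     if idx is None or idx == 0 or sentence[idx - 1][1].startswith(VERB_POS):
--         return None
--     main = sentence[:idx]
--     verbs = []
--     last = None
--     for j, token in enumerate(main):
--         if token[1].startswith(VERB_POS):
--             verbs.append(token)
--             last = j
--     subject = main[last + 1:]
--     word, pos = subject[0]
--     if word in COMPLEX_CLAUSE_SUBSTITUTIONS: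
--         subject[0] = (COMPLEX_CLAUSE_SUBSTITUTIONS[word], pos)
--     return main + [EOS_TOKENIZED], subject + verbs + sentence[idx:]
--
--
-- def _expand_complex_clauses(tokenized):
--     # Each sentence splits at most once: the aux clause's VBN is directly preceded
--     # by the main clause's last verb, so it never satisfies the guard again.
--     expanded = []
--     for sent in tokenized:
--         parts = _split_once(sent)
--         if parts is None:
--             expanded.append(sent)
--         else:
--             expanded.extend(parts)
--     tokenized[:] = expanded
--     return tokenized
-- ===== Notes on version B (the rewrite author's own statement) =====
-- stated objective: simpler
-- what changed: A's index-juggling while loop that mutates the list it is walking (insert at i+1, then re-examines the inserted clause) is replaced by a single non-recursive pass that splits each sentence at most once (correct because a produced auxiliary clause's VBN is directly preceded by the main clause's last verb, so it never satisfies the guard again - proved in Lean), finds the main clause's verbs and its last verb's position in one forward pass instead of A's filter plus reversed .index, and assigns the result back via tokenized[:] so the same list object is mutated.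
import Mathlib
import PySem

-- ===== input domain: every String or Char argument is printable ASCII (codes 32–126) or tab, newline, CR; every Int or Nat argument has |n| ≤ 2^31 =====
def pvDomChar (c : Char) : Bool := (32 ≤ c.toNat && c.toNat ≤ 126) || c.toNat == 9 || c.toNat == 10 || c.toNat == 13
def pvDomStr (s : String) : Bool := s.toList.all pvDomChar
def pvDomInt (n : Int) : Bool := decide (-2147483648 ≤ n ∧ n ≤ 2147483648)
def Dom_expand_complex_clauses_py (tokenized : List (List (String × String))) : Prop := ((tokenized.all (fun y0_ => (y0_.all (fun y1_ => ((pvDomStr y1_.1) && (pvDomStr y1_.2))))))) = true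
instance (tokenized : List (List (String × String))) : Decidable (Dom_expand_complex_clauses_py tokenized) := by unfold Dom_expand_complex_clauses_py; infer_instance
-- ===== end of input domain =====

-- B replaces A's index-juggling while loop (which mutates the list it is walking with
-- insert and re-examines the inserted clause) by a single non-recursive pass that splits
-- each sentence AT MOST ONCE — correct because a produced auxiliary clause never splits
-- again (its VBN is directly preceded by the main clause's last verb tag; proved below) —
-- and finds the main clause's verbs and its last verb's position in ONE forward pass
-- instead of A's filter plus reversed .index; objective: simpler. Both mutate the
-- caller's list in place (B via tokenized[:] = ...); the equivalence proved is about
-- the returned value (= the final list contents, identical for both).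

-- ===== PORT A =====
-- straight-line body of A's loop iteration, extracted as a helper: returns
-- some (main_clause ++ [EOS], aux_clause) when the sentence splits, none otherwise.
def pvIsVerbTag (t : String) : Bool := PySem.Str.startswith t "VB"

def pvClauseSplitA? (s : List (String × String)) :
    Option (List (String × String) × List (String × String)) :=
  let pos := s.map Prod.snd
  match PySem.List.index? pos "VBN" with
  | none => none
  | some idx =>
    if 0 < idx ∧ pvIsVerbTag (pos.getD (idx - 1) "") = false then  -- pos_tags[idx-1]: in range since 0 < idx
      let main := s.take idx
      let verbs := main.filter (fun t => pvIsVerbTag t.2)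
      match verbs.getLast? with
      | none => none  -- Python: main_clause_verbs[-1] raises IndexError; outside Pre_
      | some v =>
        let objIdx := main.length - ((PySem.List.index? (pos.take idx).reverse v.2).getD 0)
        match main.drop objIdx with
        | [] => none  -- unreachable: the object is nonempty whenever the guard held
        | f :: tl =>
          let obj' := (if f.1 = "a" then ("The", f.2) else f) :: tl
          some (main ++ [(".", ".")], obj' ++ verbs ++ s.drop idx)
    else none

-- A's while loop over an index i into the (mutated) list, as a worklist:
-- `done` holds tokenized[:i] reversed, `todo` holds tokenized[i:];
-- `insert(i+1, aux)` puts the aux clause at the head of `todo`.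
-- `fuel` only totalizes the loop; 3 * |tokenized| provably suffices on every
-- input (each sentence is visited at most twice: pvLoopA_eq below).
def pvLoopA : Nat → List (List (String × String)) → List (List (String × String)) → List (List (String × String))
  | 0, done, todo => done.reverse ++ todo  -- fuel exhausted; never reached
  | fuel + 1, done, todo =>
    match todo with
    | [] => done.reverse
    | s :: rest =>
      match pvClauseSplitA? s with
      | some (m, aux) => pvLoopA fuel (m :: done) (aux :: rest)
      | none => pvLoopA fuel (s :: done) rest

def expand_complex_clauses_py (tokenized : List (List (String × String))) : List (List (String × String)) :=
  pvLoopA (3 * tokenized.length) [] tokenized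

-- ===== PORT B =====
-- B's single forward pass over the main clause ('for j, token in enumerate(main)'):
-- accumulator = (verbs collected so far, index of the last verb seen, running index j).
def pvStepB (acc : List (String × String) × Option Nat × Nat) (t : String × String) :
    List (String × String) × Option Nat × Nat :=
  if PySem.Str.startswith t.2 "VB" then (acc.1 ++ [t], some acc.2.2, acc.2.2 + 1)
  else (acc.1, acc.2.1, acc.2.2 + 1)

-- B's _split_once: (main_clause ++ [EOS], aux_clause) or none
def pvSplitOnce? (s : List (String × String)) :
    Option (List (String × String) × List (String × String)) :=
  match List.findIdx? (fun t => t.2 == "VBN") s with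
  | none => none
  | some idx =>
    if idx = 0 then none
    else if PySem.Str.startswith (s.getD (idx - 1) ("", "")).2 "VB" then none
    else
      let main := s.take idx
      let scan := main.foldl pvStepB ([], none, 0)
      match scan.2.1 with
      | none => none  -- Python B: last is None, main[last+1:] raises; outside Pre_
      | some last =>
        match main.drop (last + 1) with
        | [] => none  -- unreachable under the guard
        | f :: tl =>
          let subj := (if f.1 = "a" then ("The", f.2) else f) :: tl
          some (main ++ [(".", ".")], subj ++ scan.1 ++ s.drop idx)

-- B's loop body: the one or two sentences a sentence expands to
def pvExpandOne (s : List (String × String)) : List (List (String × String)) :=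
  match pvSplitOnce? s with
  | none => [s]
  | some (m, aux) => [m, aux]

def expand_complex_clauses_py_alt (tokenized : List (List (String × String))) : List (List (String × String)) :=
  tokenized.foldl (fun expanded s => expanded ++ pvExpandOne s) []

-- ===== PRECONDITION & SPEC =====
-- Pre_ excludes exactly the inputs where Python A raises IndexError (at main_clause_verbs[-1]):
-- a sentence containing a splittable auxiliary clause whose main clause has no verb.
-- B raises there too (TypeError on last + 1 with last = None).
def Pre_expand_complex_clauses_py (tokenized : List (List (String × String))) : Prop :=
  ∀ s ∈ tokenized,
    (match PySem.List.index? (s.map Prod.snd) "VBN" with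
     | none => true
     | some idx =>
       !(0 < idx && !pvIsVerbTag ((s.map Prod.snd).getD (idx - 1) ""))
       || (s.take idx).any (fun t => pvIsVerbTag t.2)) = true
instance (tokenized : List (List (String × String))) : Decidable (Pre_expand_complex_clauses_py tokenized) := by unfold Pre_expand_complex_clauses_py; infer_instance

def pvWitness_expand_complex_clauses_py : (List (List (String × String))) :=
  [[("a", "DT"), ("dog", "NN"), ("bit", "VBD"), ("a", "DT"), ("man", "NN"), ("seen", "VBN"), ("here", "RB")]]

def Spec_expand_complex_clauses_py (tokenized : List (List (String × String))) (out : List (List (String × String))) : Prop := out = expand_complex_clauses_py_alt tokenized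
instance (tokenized : List (List (String × String))) (out : List (List (String × String))) : Decidable (Spec_expand_complex_clauses_py tokenized out) := by unfold Spec_expand_complex_clauses_py; infer_instance

-- ===== CLAIM (what is proved, stated in full; the proofs are below) =====
def Claim_equal_expand_complex_clauses_py : Prop := ∀ (tokenized : List (List (String × String))), Dom_expand_complex_clauses_py tokenized → Pre_expand_complex_clauses_py tokenized → Spec_expand_complex_clauses_py tokenized (expand_complex_clauses_py tokenized)

-- ===== LEMMAS AND PROOFS =====

-- index (from the head) of the last verb-tagged token, recursively (proof-only)
def pvLastVerb? : List (String × String) → Option Nat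
  | [] => none
  | t :: ts =>
    match pvLastVerb? ts with
    | some k => some (k + 1)
    | none => if pvIsVerbTag t.2 then some 0 else none

theorem pvLastVerb?_append_pos (l : List (String × String)) (t : String × String)
    (h : pvIsVerbTag t.2 = true) : pvLastVerb? (l ++ [t]) = some l.length := by
  induction l with
  | nil => simp [pvLastVerb?, h]
  | cons a l ih => simp [pvLastVerb?, ih]

theorem pvLastVerb?_append_neg (l : List (String × String)) (t : String × String)
    (h : pvIsVerbTag t.2 = false) : pvLastVerb? (l ++ [t]) = pvLastVerb? l := by
  induction l with
  | nil => simp [pvLastVerb?, h]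
  | cons a l ih => simp [pvLastVerb?, ih]

theorem pvLastVerb?_eq_none_iff (l : List (String × String)) :
    pvLastVerb? l = none ↔ l.filter (fun t => pvIsVerbTag t.2) = [] := by
  induction l with
  | nil => simp [pvLastVerb?]
  | cons a l ih =>
    simp only [pvLastVerb?, List.filter_cons]
    cases h : pvLastVerb? l with
    | none => cases hh : pvIsVerbTag a.2 <;> simp [ih.mp h]
    | some k =>
      have : l.filter (fun t => pvIsVerbTag t.2) ≠ [] := by
        intro e; rw [← ih] at e; rw [h] at e; exact absurd e (by simp)
      cases hh : pvIsVerbTag a.2 <;> simp [this]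

-- B's scan computes (the filtered verbs, the last verb's index, the length)
theorem pvScanB_spec (main : List (String × String)) :
    ∀ (vs : List (String × String)) (l0 : Option Nat) (j : Nat),
      main.foldl pvStepB (vs, l0, j) =
        (vs ++ main.filter (fun t => pvIsVerbTag t.2),
          (pvLastVerb? main).elim l0 (fun k => some (j + k)),
          j + main.length) := by
  induction main with
  | nil => intro vs l0 j; simp [pvLastVerb?]
  | cons t ts ih =>
    intro vs l0 j
    rw [List.foldl_cons]
    cases h : PySem.Str.startswith t.2 "VB" with
    | true =>
      rw [show pvStepB (vs, l0, j) t = (vs ++ [t], some j, j + 1) from by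
        unfold pvStepB; rw [h]; simp]
      rw [ih]
      simp only [pvLastVerb?, pvIsVerbTag, List.filter_cons, h, if_pos, List.append_assoc,
        List.singleton_append, List.length_cons, Prod.mk.injEq]
      refine ⟨trivial, ?_, by omega⟩
      cases hk : pvLastVerb? ts with
      | none => simp
      | some k => simp; omega
    | false =>
      rw [show pvStepB (vs, l0, j) t = (vs, l0, j + 1) from by
        unfold pvStepB; rw [h]; simp]
      rw [ih]
      simp only [pvLastVerb?, pvIsVerbTag, List.filter_cons, h, List.length_cons, Prod.mk.injEq]
      refine ⟨by simp, ?_, by omega⟩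
      cases hk : pvLastVerb? ts with
      | none => simp
      | some k => simp; omega

-- the first-VBN index computed the two ways coincides
theorem pvIdxAB (s : List (String × String)) :
    PySem.List.index? (s.map Prod.snd) "VBN" = List.findIdx? (fun t => t.2 == "VBN") s := by
  rw [PySem.List.index?_eq_idxOf?, List.idxOf?, List.findIdx?_map]
  rfl

-- A's reversed-index computation finds exactly the last verb's position
theorem pvKeyA (main : List (String × String)) (v : String × String)
    (h : (main.filter (fun t => pvIsVerbTag t.2)).getLast? = some v) :
    ∃ last, pvLastVerb? main = some last ∧ last < main.length ∧
      PySem.List.index? ((main.map Prod.snd).reverse) v.2 = some (main.length - 1 - last) := by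
  induction main using List.reverseRecOn with
  | nil => simp at h
  | append_singleton ms t ih =>
    rw [List.filter_append] at h
    by_cases ht : pvIsVerbTag t.2 = true
    · have hvt : v = t := by
        simp only [List.filter_cons, List.filter_nil, ht, if_pos] at h
        rw [List.getLast?_concat] at h
        exact (Option.some.injEq _ _).mp h.symm |>.symm ▸ rfl
      subst hvt
      refine ⟨ms.length, pvLastVerb?_append_pos ms v ht, by simp, ?_⟩
      rw [List.map_append, List.reverse_append]
      simp only [List.map_cons, List.map_nil, List.reverse_cons, List.reverse_nil,
        List.nil_append, List.singleton_append]
      rw [PySem.List.index?_cons_self]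
      simp
    · have ht' : pvIsVerbTag t.2 = false := by simpa using ht
      rw [List.filter_cons] at h
      rw [if_neg (by simp [ht'])] at h
      rw [List.filter_nil, List.append_nil] at h
      obtain ⟨last, h1, h2, h3⟩ := ih h
      have hv : pvIsVerbTag v.2 = true := by
        simpa using List.of_mem_filter (List.mem_of_getLast? h)
      have hne : t.2 ≠ v.2 := fun e => by rw [← e] at hv; rw [hv] at ht'; simp at ht'
      refine ⟨last, by rw [pvLastVerb?_append_neg ms t ht']; exact h1, by simp; omega, ?_⟩
      rw [List.map_append, List.reverse_append]
      simp only [List.map_cons, List.map_nil, List.reverse_cons, List.reverse_nil,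
        List.nil_append, List.singleton_append]
      rw [PySem.List.index?_cons_of_ne _ hne, h3]
      simp only [Option.map_some]
      congr 1
      simp only [List.length_append, List.length_cons, List.length_nil]
      omega

-- the two straight-line clause computations agree on every sentence
theorem pvSplitAB (s : List (String × String)) : pvClauseSplitA? s = pvSplitOnce? s := by
  simp only [pvClauseSplitA?, pvSplitOnce?]
  rw [pvIdxAB]
  cases hidx : List.findIdx? (fun t => t.2 == "VBN") s with
  | none => rfl
  | some idx =>
    simp only
    have hlt : idx < s.length := (List.findIdx?_eq_some_iff_findIdx_eq.mp hidx).1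
    have hguard : pvIsVerbTag ((s.map Prod.snd).getD (idx - 1) "") =
        PySem.Str.startswith (s.getD (idx - 1) ("", "")).2 "VB" := by
      unfold pvIsVerbTag
      congr 1
      rw [List.getD_eq_getElem?_getD, List.getD_eq_getElem?_getD, List.getElem?_map]
      have : idx - 1 < s.length := by omega
      rw [List.getElem?_eq_getElem this]
      rfl
    by_cases h0 : idx = 0
    · subst h0; simp
    · rw [if_neg h0]
      by_cases hs : PySem.Str.startswith (s.getD (idx - 1) ("", "")).2 "VB" = true
      · rw [if_pos hs]
        rw [if_neg (fun hc => absurd (hguard ▸ hc.2) (by rw [hs]; simp))]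
      · have hs' : PySem.Str.startswith (s.getD (idx - 1) ("", "")).2 "VB" = false := by
          simpa using hs
        rw [if_neg hs]
        rw [if_pos (show 0 < idx ∧ pvIsVerbTag ((s.map Prod.snd).getD (idx - 1) "") = false from
          ⟨Nat.pos_of_ne_zero h0, by rw [hguard]; exact hs'⟩)]
        rw [pvScanB_spec]
        simp only [List.nil_append]
        cases hfl : ((s.take idx).filter (fun t => pvIsVerbTag t.2)).getLast? with
        | none =>
          have : pvLastVerb? (s.take idx) = none :=
            (pvLastVerb?_eq_none_iff _).mpr (List.getLast?_eq_none_iff.mp hfl)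
          rw [this]
          rfl
        | some v =>
          obtain ⟨last, h1, h2, h3⟩ := pvKeyA (s.take idx) v hfl
          rw [h1]
          simp only [Option.elim, Nat.zero_add]
          have hmt : (s.map Prod.snd).take idx = (s.take idx).map Prod.snd := (List.map_take ..).symm
          rw [hmt, h3]
          simp only [Option.getD_some]
          have : (s.take idx).length - ((s.take idx).length - 1 - last) = last + 1 := by omega
          rw [this]

-- a produced auxiliary clause never splits again: its first "VBN" is directly
-- preceded by the main clause's last verb tag (cited in pvLoopA's decreasing_by)
theorem pvClauseSplitA?_aux_none {s : List (String × String)}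
    {m aux : List (String × String)} (h : pvClauseSplitA? s = some (m, aux)) :
    pvClauseSplitA? aux = none := by
  simp only [pvClauseSplitA?] at h
  cases hidx : PySem.List.index? (s.map Prod.snd) "VBN" with
  | none => rw [hidx] at h; simp at h
  | some idx =>
    rw [hidx] at h
    simp only at h
    split_ifs at h with hguard
    · cases hv : ((s.take idx).filter (fun t => pvIsVerbTag t.2)).getLast? with
      | none => rw [hv] at h; simp at h
      | some v =>
        rw [hv] at h
        simp only at h
        cases hd : (s.take idx).drop ((s.take idx).length - ((PySem.List.index? ((s.map Prod.snd).take idx).reverse v.2).getD 0)) with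
        | nil => rw [hd] at h; simp at h
        | cons f tl =>
          rw [hd] at h
          simp only [Option.some.injEq, Prod.mk.injEq] at h
          obtain ⟨hm, haux⟩ := h
          obtain ⟨pre, suf, hpos, hlen, hnot⟩ := (PySem.List.index?_eq_some_iff _ _ _).mp hidx
          have hmainmap : (s.take idx).map Prod.snd = pre := by
            rw [List.map_take, hpos, ← hlen, List.take_left]
          have hdropmap : (s.drop idx).map Prod.snd = "VBN" :: suf := by
            rw [List.map_drop, hpos, ← hlen, List.drop_left]
          have hobj : (f :: tl).map Prod.snd = pre.drop ((s.take idx).length - ((PySem.List.index? ((s.map Prod.snd).take idx).reverse v.2).getD 0)) := by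
            rw [← hd, List.map_drop, hmainmap]
          have hVBNobj : "VBN" ∉ (f :: tl).map Prod.snd := by
            rw [hobj]; intro hmm; exact hnot (List.mem_of_mem_drop hmm)
          have hsnd : (if f.1 = "a" then ("The", f.2) else f).2 = f.2 := by split <;> rfl
          have hVBNverbs : "VBN" ∉ ((s.take idx).filter (fun t => pvIsVerbTag t.2)).map Prod.snd := by
            intro hmm
            obtain ⟨t, ht, h2⟩ := List.mem_map.mp hmm
            have : t.2 ∈ (s.take idx).map Prod.snd := List.mem_map_of_mem (List.mem_of_mem_filter ht)
            rw [hmainmap] at this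
            exact hnot (h2 ▸ this)
          have hvmem : v ∈ (s.take idx).filter (fun t => pvIsVerbTag t.2) := List.mem_of_getLast? hv
          have hvtag : pvIsVerbTag v.2 = true := by simpa using List.of_mem_filter hvmem
          have hobj'map : ((if f.1 = "a" then ("The", f.2) else f) :: tl).map Prod.snd = (f :: tl).map Prod.snd := by
            simp [hsnd]
          have hauxmap : aux.map Prod.snd =
              ((f :: tl).map Prod.snd ++ ((s.take idx).filter (fun t => pvIsVerbTag t.2)).map Prod.snd) ++ ("VBN" :: suf) := by
            rw [← haux]; simp only [List.map_append, hobj'map, hdropmap, List.append_assoc]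
          have hL2last : (((s.take idx).filter (fun t => pvIsVerbTag t.2)).map Prod.snd).getLast? = some v.2 := by
            rw [List.getLast?_map, hv]; rfl
          have hL2ne : (((s.take idx).filter (fun t => pvIsVerbTag t.2)).map Prod.snd) ≠ [] := by
            intro e; rw [e] at hL2last; simp at hL2last
          set L1 := (f :: tl).map Prod.snd with hL1
          set L2 := ((s.take idx).filter (fun t => pvIsVerbTag t.2)).map Prod.snd with hL2
          have hK : PySem.List.index? (aux.map Prod.snd) "VBN" = some ((L1 ++ L2).length) := by
            apply (PySem.List.index?_eq_some_iff _ _ _).mpr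
            exact ⟨L1 ++ L2, suf, by rw [hauxmap], rfl, by
              intro hmm
              rcases List.mem_append.mp hmm with h1 | h2
              · exact hVBNobj h1
              · exact hVBNverbs h2⟩
          have hlen1 : 0 < L1.length := by simp [hL1]
          have hlen2 : 0 < L2.length := List.length_pos_of_ne_nil hL2ne
          have hguardval : (aux.map Prod.snd).getD ((L1 ++ L2).length - 1) "" = v.2 := by
            rw [hauxmap]
            rw [List.getD_append _ _ _ _ (by simp; omega)]
            rw [List.getD_append_right _ _ _ _ (by simp; omega)]
            have hidx2 : L1.length + L2.length - 1 - L1.length = L2.length - 1 := by omega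
            rw [List.length_append, hidx2]
            rw [List.getD_eq_getElem?_getD, ← List.getLast?_eq_getElem?, hL2last]
            rfl
          simp only [pvClauseSplitA?]
          rw [hK]
          simp only
          rw [if_neg]
          intro ⟨_, hc⟩
          rw [hguardval, hvtag] at hc
          exact absurd hc (by simp)

theorem pvExpandOne_some {s m aux : List (String × String)}
    (h : pvClauseSplitA? s = some (m, aux)) : pvExpandOne s = [m, aux] := by
  unfold pvExpandOne
  rw [← pvSplitAB, h]

theorem pvExpandOne_none {s : List (String × String)}
    (h : pvClauseSplitA? s = none) : pvExpandOne s = [s] := by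
  unfold pvExpandOne
  rw [← pvSplitAB, h]

theorem pvLoopA_eq (fuel : Nat) (done todo : List (List (String × String)))
    (hf : 2 * (todo.countP fun t => (pvClauseSplitA? t).isSome) + todo.length ≤ fuel) :
    pvLoopA fuel done todo = done.reverse ++ todo.flatMap pvExpandOne := by
  induction fuel generalizing done todo with
  | zero =>
    have : todo = [] := by
      cases todo with
      | nil => rfl
      | cons s rest => simp at hf
    subst this
    simp [pvLoopA]
  | succ fuel ih =>
    cases todo with
    | nil => simp [pvLoopA]
    | cons s rest =>
      rw [pvLoopA]
      cases h : pvClauseSplitA? s with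
      | some p =>
        obtain ⟨m, aux⟩ := p
        have haux : pvClauseSplitA? aux = none := pvClauseSplitA?_aux_none h
        show pvLoopA fuel (m :: done) (aux :: rest) = done.reverse ++ List.flatMap pvExpandOne (s :: rest)
        rw [ih (m :: done) (aux :: rest) (by simp [h, haux] at hf ⊢; omega)]
        rw [List.flatMap_cons, List.flatMap_cons, pvExpandOne_some h, pvExpandOne_none haux]
        simp
      | none =>
        show pvLoopA fuel (s :: done) rest = done.reverse ++ List.flatMap pvExpandOne (s :: rest)
        rw [ih (s :: done) rest (by simp [h] at hf ⊢; omega)]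
        simp [List.flatMap_cons, pvExpandOne_none h]

-- ===== VERDICT (by name: the statement is the Claim_ definition above) =====
theorem expand_complex_clauses_py_spec : Claim_equal_expand_complex_clauses_py := by
  intro tokenized _ _
  unfold Spec_expand_complex_clauses_py expand_complex_clauses_py expand_complex_clauses_py_alt
  rw [PySem.List.foldl_append_eq_flatMap]
  rw [pvLoopA_eq _ [] tokenized (by
    have := List.countP_le_length (l := tokenized) (p := fun t => (pvClauseSplitA? t).isSome)
    omega)]
  simp
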